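-- pv_equiv track=rewrite | github.com/marindeaudouce/advent_of_code_2024 | day02/reactor.py | check_level
-- ===== SOURCE A (Python) =====
-- def is_less_with_margin(val1, val2, margin):
--     return val1 < val2 and val1 + margin >= val2
--
-- def is_more_with_margin(val1, val2, margin):
--     return val1 > val2 and val1 <= val2 + margin
--
-- def check_level(data):
--     safe = True
--     inc = False # Check all decreasing by default
--     for i in range(len(data) - 1):
--         if i == 0:
--             if is_less_with_margin(data[i], data[i + 1], 3) or is_more_with_margin(data[i], data[i + 1], 3):
--                 if is_less_with_margin(data[i], data[i + 1], 3):
--                     inc = True # Check all increasing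
--             else:
--                 safe = False
--         else:
--             if inc:
--                 safe = is_less_with_margin(data[i], data[i + 1], 3)
--             else:
--                 safe = is_more_with_margin(data[i], data[i + 1], 3)
--
--         if not safe:
--             break # break as soon as unsafe detected
--
--     return safe
-- ===== SOURCE B (Python) =====
-- def check_level(data):
--     def gentle_ascent(seq):
--         # strictly increasing with each step at most 3
--         return all(0 < y - x <= 3 for x, y in zip(seq, seq[1:]))
--     return gentle_ascent(data) or gentle_ascent(data[::-1])
-- ===== Notes on version B (the rewrite author's own statement) =====
-- stated objective: simpler
-- what changed: B drops A's direction selection entirely: instead of inspecting the first pair to pick increasing/decreasing and threading safe/inc flags through an index loop, it defines one 'gentle ascent' predicate and returns gentle_ascent(data) or gentle_ascent(reversed(data)) - a report is safe iff it or its reversal is a bounded strict ascent.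
import Mathlib
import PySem

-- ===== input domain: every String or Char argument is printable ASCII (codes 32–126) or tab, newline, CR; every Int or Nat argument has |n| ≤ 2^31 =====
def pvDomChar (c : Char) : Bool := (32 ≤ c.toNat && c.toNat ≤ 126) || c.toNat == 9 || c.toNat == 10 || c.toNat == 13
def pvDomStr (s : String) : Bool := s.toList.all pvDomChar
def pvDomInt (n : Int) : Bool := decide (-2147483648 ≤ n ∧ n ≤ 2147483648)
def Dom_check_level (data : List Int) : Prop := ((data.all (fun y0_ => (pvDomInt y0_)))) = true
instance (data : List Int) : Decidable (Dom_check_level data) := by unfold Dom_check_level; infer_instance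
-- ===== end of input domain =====

-- B drops A's direction selection (safe/inc flags, i==0 branch, early break): one
-- 'gentle ascent' predicate applied to the list and to its reversal (objective: simpler).


-- ===== PORT A =====
def is_less_with_margin (val1 val2 margin : Int) : Bool :=
  decide (val1 < val2 ∧ val1 + margin ≥ val2)

def is_more_with_margin (val1 val2 margin : Int) : Bool :=
  decide (val1 > val2 ∧ val1 ≤ val2 + margin)

-- the 'for i in range(len(data)-1)' loop of A, with state (safe, inc) and the early break
def check_level_loop (data : List Int) (idxs : List Int) (safe inc : Bool) : Bool :=
  match idxs with
  | [] => safe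
  | i :: rest =>
    let d0 := (PySem.List.pyGet? data i).getD 0        -- data[i]   (always in range here)
    let d1 := (PySem.List.pyGet? data (i + 1)).getD 0  -- data[i+1] (always in range here)
    let st :=
      if i = 0 then
        if is_less_with_margin d0 d1 3 || is_more_with_margin d0 d1 3 then
          (safe, if is_less_with_margin d0 d1 3 then true else inc)
        else (false, inc)
      else
        ((if inc then is_less_with_margin d0 d1 3 else is_more_with_margin d0 d1 3), inc)
    if !st.1 then st.1 else check_level_loop data rest st.1 st.2

def check_level (data : List Int) : Bool :=
  check_level_loop data (PySem.List.pyRange 0 ((data.length : Int) - 1) 1) true false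

-- ===== PORT B =====
def pvIncP (p : Int × Int) : Bool := decide (0 < p.2 - p.1 ∧ p.2 - p.1 ≤ 3)

-- all(0 < y - x <= 3 for x, y in zip(seq, seq[1:]))
def gentle_ascent (seq : List Int) : Bool :=
  (seq.zip (PySem.List.slice seq (some 1) none)).all pvIncP

def check_level_alt (data : List Int) : Bool :=
  gentle_ascent data || gentle_ascent ((PySem.List.slice? data none none (-1)).getD [])

-- ===== PRECONDITION & SPEC =====
def Spec_check_level (data : List Int) (out : Bool) : Prop := out = check_level_alt data
instance (data : List Int) (out : Bool) : Decidable (Spec_check_level data out) := by unfold Spec_check_level; infer_instance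

-- ===== CLAIM (what is proved, stated in full; the proofs are below) =====
def Claim_equal_check_level : Prop := ∀ (data : List Int), Dom_check_level data → Spec_check_level data (check_level data)

-- ===== LEMMAS AND PROOFS =====

def pvDecP (p : Int × Int) : Bool := decide (0 < p.1 - p.2 ∧ p.1 - p.2 ≤ 3)

theorem pv_less_eq_inc (a b : Int) : is_less_with_margin a b 3 = pvIncP (a, b) := by
  simp only [is_less_with_margin, pvIncP, decide_eq_decide]
  constructor <;> (intro h; omega)

theorem pv_more_eq_dec (a b : Int) : is_more_with_margin a b 3 = pvDecP (a, b) := by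
  simp only [is_more_with_margin, pvDecP, decide_eq_decide]
  constructor <;> (intro h; omega)

theorem pv_inc_not_dec {p : Int × Int} (h : pvIncP p = true) : pvDecP p = false := by
  simp only [pvIncP, pvDecP, decide_eq_true_eq, decide_eq_false_iff_not] at *
  omega

theorem pv_pairs_length (data : List Int) :
    (data.zip data.tail).length = data.length - 1 := by
  simp [List.length_zip]

theorem pv_pairs_getElem (data : List Int) (j : Nat)
    (hj : j < (data.zip data.tail).length) :
    (data.zip data.tail)[j] =
      ((data.getD j 0), (data.getD (j + 1) 0)) := by
  have hlen := pv_pairs_length data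
  have hj1 : j < data.length := by omega
  have hj2 : j < data.tail.length := by simp [List.length_tail]; omega
  have hj3 : j + 1 < data.length := by omega
  rw [List.getElem_zip]
  congr 1
  · exact (List.getD_eq_getElem data 0 hj1).symm
  · rw [List.getElem_tail]
    exact (List.getD_eq_getElem data 0 hj3).symm

-- appending one element on the right adds one pair at the end
theorem pv_pairs_all_concat (p : Int × Int → Bool) :
    ∀ (xs : List Int) (a : Int),
    (((xs ++ [a]).zip (xs ++ [a]).tail).all p
      = (((xs.zip xs.tail).all p) && (match xs.getLast? with
          | none => true
          | some x => p (x, a)))) := by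
  intro xs
  induction xs with
  | nil => intro a; rfl
  | cons x xs' ih =>
    intro a
    cases xs' with
    | nil => simp
    | cons y t =>
      have h := ih a
      simp only [List.cons_append, List.tail_cons, List.zip_cons_cons, List.all_cons,
        List.getLast?_cons_cons] at *
      rw [h, Bool.and_assoc]

-- a gentle ascent of the reversal is a gentle descent of the list
theorem pv_ascent_reverse (l : List Int) :
    gentle_ascent l.reverse = (l.zip l.tail).all pvDecP := by
  unfold gentle_ascent
  rw [PySem.List.slice_from_one]
  induction l with
  | nil => rfl
  | cons a t ih =>
    rw [List.reverse_cons, pv_pairs_all_concat, ih]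
    cases t with
    | nil => rfl
    | cons b t' =>
      have hlast : (b :: t').reverse.getLast? = some b := by
        simp [List.getLast?_reverse]
      rw [hlast]
      simp only [List.tail_cons, List.zip_cons_cons, List.all_cons]
      have hswap : pvIncP (b, a) = pvDecP (a, b) := by
        simp only [pvIncP, pvDecP]
      rw [hswap, Bool.and_comm]

-- A's result, written as a first-pair dispatch over the pair list (proof intermediary)
def pvSpine (data : List Int) : Bool :=
  match data.zip data.tail with
  | [] => true
  | p :: _ =>
    if pvIncP p then (data.zip data.tail).all pvIncP
    else if pvDecP p then (data.zip data.tail).all pvDecP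
    else false

-- after the first iteration (index ≥ 1), A's loop is a uniform all-pairs check
theorem pv_loop_eq_all (data : List Int) (inc : Bool) :
    ∀ n j : Nat, n = data.length - 1 - j → 1 ≤ j →
    check_level_loop data (PySem.List.pyRange (j : Int) ((data.length : Int) - 1) 1) true inc
      = ((data.zip data.tail).drop j).all (if inc then pvIncP else pvDecP) := by
  intro n
  induction n with
  | zero =>
    intro j hn hj
    have hnil : ((data.length : Int) - 1) ≤ (j : Int) := by omega
    rw [PySem.List.pyRange_one_eq_nil hnil]
    have : (data.zip data.tail).length ≤ j := by rw [pv_pairs_length]; omega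
    rw [List.drop_eq_nil_of_le this]
    rfl
  | succ n ih =>
    intro j hn hj
    have hjlt : (j : Int) < (data.length : Int) - 1 := by omega
    have hjp : j < (data.zip data.tail).length := by rw [pv_pairs_length]; omega
    have hj1 : j < data.length := by omega
    have hj2 : j + 1 < data.length := by omega
    rw [PySem.List.pyRange_one_cons hjlt]
    rw [List.drop_eq_getElem_cons hjp, List.all_cons, pv_pairs_getElem data j hjp]
    show (let d0 := (PySem.List.pyGet? data (j : Int)).getD 0
          let d1 := (PySem.List.pyGet? data ((j : Int) + 1)).getD 0
          let st :=
            if (j : Int) = 0 then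
              if is_less_with_margin d0 d1 3 || is_more_with_margin d0 d1 3 then
                (true, if is_less_with_margin d0 d1 3 then true else inc)
              else (false, inc)
            else
              ((if inc then is_less_with_margin d0 d1 3 else is_more_with_margin d0 d1 3), inc)
          if !st.1 then st.1 else check_level_loop data _ st.1 st.2) = _
    have hjne : ((j : Int) = 0) = False := by simp; omega
    have hcast : ((j : Int) + 1) = ((j + 1 : Nat) : Int) := by push_cast; ring
    simp only [hjne, if_false, hcast, PySem.List.pyGet?_natCast,
      List.getElem?_eq_getElem hj1, List.getElem?_eq_getElem hj2, Option.getD_some]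
    have hget1 : data[j] = data.getD j 0 := (List.getD_eq_getElem data 0 hj1).symm
    have hget2 : data[j + 1] = data.getD (j + 1) 0 := (List.getD_eq_getElem data 0 hj2).symm
    rw [hget1, hget2]
    cases inc with
    | true =>
      simp only [if_true, pv_less_eq_inc]
      cases hP : pvIncP (data.getD j 0, data.getD (j + 1) 0) with
      | false => simp
      | true => simpa using ih (j + 1) (by omega) (by omega)
    | false =>
      simp only [Bool.false_eq_true, if_false, pv_more_eq_dec]
      cases hP : pvDecP (data.getD j 0, data.getD (j + 1) 0) with
      | false => simp
      | true => simpa using ih (j + 1) (by omega) (by omega)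

-- A computes the first-pair dispatch
theorem pv_a_eq_spine (data : List Int) : check_level data = pvSpine data := by
  unfold check_level pvSpine
  match data with
  | [] => rfl
  | [a] => rfl
  | a :: b :: rest =>
    have h0 : (0 : Int) < ((a :: b :: rest).length : Int) - 1 := by simp
    rw [PySem.List.pyRange_one_cons h0]
    show (let d0 := (PySem.List.pyGet? (a :: b :: rest) (0 : Int)).getD 0
          let d1 := (PySem.List.pyGet? (a :: b :: rest) ((0 : Int) + 1)).getD 0
          let st :=
            if (0 : Int) = 0 then
              if is_less_with_margin d0 d1 3 || is_more_with_margin d0 d1 3 then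
                (true, if is_less_with_margin d0 d1 3 then true else false)
              else (false, false)
            else
              ((if false then is_less_with_margin d0 d1 3 else is_more_with_margin d0 d1 3), false)
          if !st.1 then st.1 else check_level_loop (a :: b :: rest) _ st.1 st.2) = _
    have e0 : (PySem.List.pyGet? (a :: b :: rest) (0 : Int)).getD 0 = a := by
      simp only [PySem.List.pyGet?, PySem.List.pyIdx?]
      rw [if_pos (le_refl (0 : Int)),
          if_pos (by push_cast [List.length_cons]; omega : (0 : Int) < ((a :: b :: rest).length : Int))]
      simp
    have e1 : (PySem.List.pyGet? (a :: b :: rest) ((0 : Int) + 1)).getD 0 = b := by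
      simp only [PySem.List.pyGet?, PySem.List.pyIdx?]
      rw [if_pos (by norm_num : (0 : Int) ≤ 0 + 1),
          if_pos (by push_cast [List.length_cons]; omega : (0 : Int) + 1 < ((a :: b :: rest).length : Int))]
      norm_num
    simp only [e0, e1, if_true, pv_less_eq_inc, pv_more_eq_dec]
    have hloop := pv_loop_eq_all (a :: b :: rest)
    cases hI : pvIncP (a, b) with
    | true =>
      have hthis := hloop true ((a :: b :: rest).length - 1 - 1) 1 rfl (by omega)
      rw [Nat.cast_one] at hthis
      simp only [List.tail_cons, List.zip_cons_cons, List.drop_succ_cons, List.drop_zero,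
        hI, Bool.true_or, if_true, Bool.not_true, Bool.false_eq_true, if_false,
        zero_add, List.all_cons, Bool.true_and] at hthis ⊢
      exact hthis
    | false =>
      cases hD : pvDecP (a, b) with
      | true =>
        have hthis := hloop false ((a :: b :: rest).length - 1 - 1) 1 rfl (by omega)
        rw [Nat.cast_one] at hthis
        simp only [List.tail_cons, List.zip_cons_cons, List.drop_succ_cons, List.drop_zero,
          hI, hD, Bool.false_or, if_true, Bool.not_true, Bool.false_eq_true, if_false,
          zero_add, List.all_cons, Bool.true_and] at hthis ⊢
        exact hthis
      | false =>
        simp [hI, hD]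

-- B computes the same dispatch
theorem pv_alt_eq_spine (data : List Int) : check_level_alt data = pvSpine data := by
  unfold check_level_alt pvSpine
  rw [PySem.List.slice?_none_none_neg_one, Option.getD_some, pv_ascent_reverse]
  unfold gentle_ascent
  rw [PySem.List.slice_from_one]
  match data with
  | [] => rfl
  | [a] => rfl
  | a :: b :: rest =>
    simp only [List.tail_cons, List.zip_cons_cons, List.all_cons]
    cases hI : pvIncP (a, b) with
    | true => simp [pv_inc_not_dec hI]
    | false =>
      cases hD : pvDecP (a, b) with
      | true => simp
      | false => simp

-- ===== VERDICT (by name: the statement is the Claim_ definition above) =====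
theorem check_level_spec : Claim_equal_check_level := by
  intro data _
  unfold Spec_check_level
  rw [pv_a_eq_spine, pv_alt_eq_spine]
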